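-- pv_equiv track=rewrite | github.com/kofort9/sentry | sentries/diff_utils.py | is_allowed_path
-- ===== SOURCE A (Python) =====
-- from typing import List, Tuple, Optional
--
-- def is_allowed_path(path: str, allowlist: List[str]) -> bool:
--     """
--     Check if a path is allowed based on the allowlist.
--
--     Args:
--         path: File path to check
--         allowlist: List of allowed path patterns
--
--     Returns:
--         True if path is allowed, False otherwise
--     """
--     for pattern in allowlist:
--         if pattern.endswith("/"):
--             # Directory pattern (e.g., "tests/")
--             if path.startswith(pattern):
--                 return True
--         elif pattern.endswith("**"):
--             # Recursive pattern (e.g., "docs/**")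
--             base_pattern = pattern[:-2]
--             if path.startswith(base_pattern):
--                 return True
--         else:
--             # Exact file pattern (e.g., "README.md")
--             if path == pattern:
--                 return True
--
--     return False
-- ===== SOURCE B (Python) =====
-- def is_allowed_path(path, allowlist):
--     # Phase 1: normalize the allowlist into hash sets: the set of required
--     # prefixes, the set of their lengths, and the set of exact file names.
--     prefix_allowed = set()
--     lengths = set()
--     exact_allowed = set()
--     for pattern in allowlist:
--         if pattern.endswith("/"):
--             prefix_allowed.add(pattern)
--             lengths.add(len(pattern))
--         elif pattern.endswith("**"):
--             base = pattern[:-2]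
--             prefix_allowed.add(base)
--             lengths.add(len(base))
--         else:
--             exact_allowed.add(pattern)
--     # Phase 2: invert the match — probe PATH'S OWN PREFIXES (one per stored
--     # length) against the prefix set, instead of scanning the patterns.
--     if path in exact_allowed:
--         return True
--     return any(path[:k] in prefix_allowed for k in lengths)
-- ===== Notes on version B (the rewrite author's own statement) =====
-- stated objective: alternative
-- what changed: B normalizes the allowlist into hash sets (required prefixes, their lengths, exact names), then inverts the matching loop: instead of testing every pattern against the path, it probes the path's own prefixes (one per stored length) by set membership.
import Mathlib
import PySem

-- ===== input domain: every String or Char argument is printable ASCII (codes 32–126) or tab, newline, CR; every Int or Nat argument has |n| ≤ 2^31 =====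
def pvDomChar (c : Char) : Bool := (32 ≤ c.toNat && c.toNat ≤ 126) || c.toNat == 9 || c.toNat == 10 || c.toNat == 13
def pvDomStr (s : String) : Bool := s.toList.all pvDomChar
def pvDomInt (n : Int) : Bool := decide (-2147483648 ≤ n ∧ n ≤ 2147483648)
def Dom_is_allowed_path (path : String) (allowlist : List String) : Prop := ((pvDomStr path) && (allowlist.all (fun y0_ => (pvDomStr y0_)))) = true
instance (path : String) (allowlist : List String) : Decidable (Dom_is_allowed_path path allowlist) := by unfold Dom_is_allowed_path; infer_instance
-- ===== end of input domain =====

-- B normalizes the allowlist into hash sets (prefixes, their lengths, exact names), then inverts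
-- the match: it probes the path's own prefixes by set membership (alternative decomposition).


-- ===== PORT A =====
def is_allowed_path (path : String) (allowlist : List String) : Bool :=
  match allowlist with
  | [] => false
  | pattern :: rest =>
    if PySem.Str.endswith pattern "/" then
      if PySem.Str.startswith path pattern then true else is_allowed_path path rest
    else if PySem.Str.endswith pattern "**" then
      if PySem.Str.startswith path (PySem.Str.slice pattern none (some (-2))) then true
      else is_allowed_path path rest
    else
      if path == pattern then true else is_allowed_path path rest

-- ===== PORT B =====
-- Phase 1: classify one pattern into (prefix_allowed, lengths, exact_allowed)
def is_allowed_path_alt_step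
    (acc : PySem.Set String × PySem.Set Int × PySem.Set String) (pattern : String) :
    PySem.Set String × PySem.Set Int × PySem.Set String :=
  if PySem.Str.endswith pattern "/" then
    (PySem.Set.add acc.1 pattern, PySem.Set.add acc.2.1 (PySem.Str.len pattern : Int), acc.2.2)
  else if PySem.Str.endswith pattern "**" then
    let base := PySem.Str.slice pattern none (some (-2))
    (PySem.Set.add acc.1 base, PySem.Set.add acc.2.1 (PySem.Str.len base : Int), acc.2.2)
  else (acc.1, acc.2.1, PySem.Set.add acc.2.2 pattern)

-- Phase 2: exact-set lookup, then probe path's own prefixes (one per stored length)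
def is_allowed_path_alt (path : String) (allowlist : List String) : Bool :=
  let st := allowlist.foldl is_allowed_path_alt_step
    (PySem.Set.empty, PySem.Set.empty, PySem.Set.empty)
  if PySem.Set.contains st.2.2 path then true
  else st.2.1.any (fun k => PySem.Set.contains st.1 (PySem.Str.slice path none (some k)))

-- ===== PRECONDITION & SPEC =====
def Spec_is_allowed_path (path : String) (allowlist : List String) (out : Bool) : Prop := out = is_allowed_path_alt path allowlist
instance (path : String) (allowlist : List String) (out : Bool) : Decidable (Spec_is_allowed_path path allowlist out) := by unfold Spec_is_allowed_path; infer_instance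

-- ===== CLAIM (what is proved, stated in full; the proofs are below) =====
def Claim_equal_is_allowed_path : Prop := ∀ (path : String) (allowlist : List String), Dom_is_allowed_path path allowlist → Spec_is_allowed_path path allowlist (is_allowed_path path allowlist)

-- ===== LEMMAS AND PROOFS =====

-- proof-only: whether one pattern matches path, per A's classification
def pvMatch (path pattern : String) : Bool :=
  if PySem.Str.endswith pattern "/" then PySem.Str.startswith path pattern
  else if PySem.Str.endswith pattern "**" then
    PySem.Str.startswith path (PySem.Str.slice pattern none (some (-2)))
  else path == pattern

theorem a_eq_any (path : String) (l : List String) :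
    is_allowed_path path l = l.any (pvMatch path) := by
  induction l with
  | nil => rfl
  | cons pattern rest ih =>
    simp only [is_allowed_path, List.any_cons, pvMatch]
    split_ifs <;> simp_all

-- membership in a set after add, as Bool
theorem contains_add {α : Type} [BEq α] [LawfulBEq α] (s : PySem.Set α) (x y : α) :
    PySem.Set.contains (PySem.Set.add s x) y = (PySem.Set.contains s y || y == x) := by
  rw [Bool.eq_iff_iff]
  simp [pysem, PySem.Set.mem_add]

-- any over a set after add
theorem any_add {α : Type} [BEq α] [LawfulBEq α] (s : PySem.Set α) (f : α → Bool) (x : α) :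
    (PySem.Set.add s x).any f = (s.any f || f x) := by
  rw [PySem.Set.add_eq_ite]
  split_ifs with h
  · rw [Bool.eq_iff_iff]
    simp only [List.any_eq_true, Bool.or_eq_true]
    exact ⟨Or.inl, fun hc => hc.elim id (fun hf => ⟨x, h, hf⟩)⟩
  · simp

-- invariant of phase 1: every stored prefix has its length stored, lengths are nonnegative
def pvInv (P : PySem.Set String) (Ls : PySem.Set Int) : Prop :=
  (∀ p ∈ P, ((p.toList.length : Int)) ∈ Ls) ∧ (∀ k ∈ Ls, 0 ≤ k)

-- key inversion lemma: probing path's prefixes at the stored lengths ≡ testing each stored prefix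
theorem probe_eq_any_startswith (path : String) (P : PySem.Set String) (Ls : PySem.Set Int)
    (h : pvInv P Ls) :
    Ls.any (fun k => PySem.Set.contains P (PySem.Str.slice path none (some k))) =
      P.any (fun p => PySem.Str.startswith path p) := by
  obtain ⟨hlen, hpos⟩ := h
  rw [Bool.eq_iff_iff]
  simp only [List.any_eq_true, pysem, List.contains_iff_mem]
  constructor
  · rintro ⟨k, hk, hmem⟩
    refine ⟨PySem.Str.slice path none (some k), hmem, ?_⟩
    have ht : (PySem.Str.slice path none (some k)).toList =
        PySem.List.slice path.toList none (some k) := by simp [pysem]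
    rw [ht, PySem.List.slice_to _ (hpos k hk)]
    exact List.take_prefix _ _
  · rintro ⟨p, hp, hsw⟩
    refine ⟨(p.toList.length : Int), hlen p hp, ?_⟩
    have hq : PySem.Str.slice path none (some ((p.toList.length : Int))) = p := by
      apply String.toList_inj.mp
      have ht : (PySem.Str.slice path none (some ((p.toList.length : Int)))).toList =
          PySem.List.slice path.toList none (some ((p.toList.length : Int))) := by simp [pysem]
      rw [ht, PySem.List.slice_to _ (by positivity)]
      simp
      exact (List.prefix_iff_eq_take.mp hsw).symm
    rw [hq]
    exact hp
  
-- the invariant survives one classification step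
theorem pvInv_step (st : PySem.Set String × PySem.Set Int × PySem.Set String) (pattern : String)
    (h : pvInv st.1 st.2.1) :
    pvInv (is_allowed_path_alt_step st pattern).1 (is_allowed_path_alt_step st pattern).2.1 := by
  obtain ⟨hlen, hpos⟩ := h
  simp only [is_allowed_path_alt_step]
  split_ifs <;>
    refine ⟨?_, ?_⟩ <;>
    simp only [PySem.Set.mem_add, pysem] <;>
    first
      | exact fun p hp => hp.elim (fun h' => Or.inl (hlen p h')) (fun h' => Or.inr (by simp [h']))
      | exact fun k hk => hk.elim (fun h' => hpos k h') (fun h' => by simp [h'])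
      | exact hlen
      | exact hpos

-- the invariant holds after the whole phase-1 fold
theorem pvInv_fold (l : List String) (st : PySem.Set String × PySem.Set Int × PySem.Set String)
    (h : pvInv st.1 st.2.1) :
    pvInv (l.foldl is_allowed_path_alt_step st).1 (l.foldl is_allowed_path_alt_step st).2.1 := by
  induction l generalizing st with
  | nil => exact h
  | cons pattern rest ih => exact ih _ (pvInv_step st pattern h)

-- proof-only: B's answer on a state, with the probe already rewritten to per-prefix startswith
def pvCheck (path : String) (st : PySem.Set String × PySem.Set Int × PySem.Set String) : Bool :=
  PySem.Set.contains st.2.2 path || st.1.any (fun p => PySem.Str.startswith path p)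

theorem pvCheck_step (path : String) (st : PySem.Set String × PySem.Set Int × PySem.Set String)
    (pattern : String) :
    pvCheck path (is_allowed_path_alt_step st pattern) = (pvCheck path st || pvMatch path pattern) := by
  simp only [is_allowed_path_alt_step, pvCheck, pvMatch]
  split_ifs
  · rw [any_add, ← Bool.or_assoc]
  · rw [any_add, ← Bool.or_assoc]
  · rw [contains_add, beq_eq_decide path pattern, Bool.or_assoc, Bool.or_assoc,
      Bool.or_comm (decide _)]

theorem pvCheck_fold (path : String) (l : List String)
    (st : PySem.Set String × PySem.Set Int × PySem.Set String) :
    pvCheck path (l.foldl is_allowed_path_alt_step st) = (pvCheck path st || l.any (pvMatch path)) := by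
  induction l generalizing st with
  | nil => simp
  | cons pattern rest ih =>
    simp only [List.foldl_cons, List.any_cons, ih, pvCheck_step, Bool.or_assoc]

-- ===== VERDICT (by name: the statement is the Claim_ definition above) =====
theorem is_allowed_path_spec : Claim_equal_is_allowed_path := by
  intro path allowlist _
  unfold Spec_is_allowed_path
  show is_allowed_path path allowlist = is_allowed_path_alt path allowlist
  have hb : is_allowed_path_alt path allowlist =
      pvCheck path (allowlist.foldl is_allowed_path_alt_step
        (PySem.Set.empty, PySem.Set.empty, PySem.Set.empty)) := by
    unfold is_allowed_path_alt pvCheck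
    simp only []
    rw [probe_eq_any_startswith path _ _
      (pvInv_fold allowlist (PySem.Set.empty, PySem.Set.empty, PySem.Set.empty)
        ⟨by simp [PySem.Set.empty], by simp [PySem.Set.empty]⟩)]
    split <;> simp_all
  rw [hb, pvCheck_fold, a_eq_any]
  simp [pvCheck, PySem.Set.empty, PySem.Set.contains]
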